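-- pv_equiv track=rewrite | github.com/ademkikaj/concept-learning | App.py | get_cartesian
-- ===== SOURCE A (Python) =====
-- import itertools
--
-- def get_cartesian(keys, attributes):
--     list_of_attributes = []
--     cartesian_product = []
--     for key in keys:
--         list_of_attributes.append(attributes[key])
--     for element in itertools.product(*list_of_attributes):
--         cartesian_product.append(element)
--     return cartesian_product
-- ===== SOURCE B (Python) =====
-- def get_cartesian(keys, attributes):
--     result = [()]
--     for key in keys:
--         attrs = attributes[key]
--         result = [prev + (x,) for prev in result for x in attrs]
--     return result
-- ===== Notes on version B (the rewrite author's own statement) =====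
-- stated objective: alternative
-- what changed: Replaces itertools.product over a pre-collected list of attribute lists with a hand-rolled iterative expansion that grows the result one key at a time (result = [prev + (x,) for prev in result for x in attrs]).
import Mathlib
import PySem

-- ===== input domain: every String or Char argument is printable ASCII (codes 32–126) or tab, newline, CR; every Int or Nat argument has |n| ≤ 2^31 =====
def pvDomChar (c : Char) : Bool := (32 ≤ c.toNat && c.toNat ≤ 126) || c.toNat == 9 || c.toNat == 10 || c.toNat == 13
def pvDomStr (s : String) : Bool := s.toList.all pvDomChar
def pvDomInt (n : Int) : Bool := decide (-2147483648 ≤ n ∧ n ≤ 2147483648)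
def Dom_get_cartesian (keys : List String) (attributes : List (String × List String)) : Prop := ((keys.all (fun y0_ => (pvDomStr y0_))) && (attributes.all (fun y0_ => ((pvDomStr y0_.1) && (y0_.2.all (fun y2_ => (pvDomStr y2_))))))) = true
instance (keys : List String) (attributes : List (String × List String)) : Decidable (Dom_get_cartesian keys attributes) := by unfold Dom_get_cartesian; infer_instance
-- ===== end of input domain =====

-- B replaces itertools.product over pre-collected lists with an iterative one-key-at-a-time expansion of the result; same cost, different decomposition.


-- shared helper: Python's 'attributes[key]' (dict lookup, first match; KeyError excluded by Pre_)
def pvLookup (attributes : List (String × List String)) (k : String) : List String :=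
  ((attributes.find? (fun p => p.1 == k)).map Prod.snd).getD []

-- ===== PORT A =====
-- itertools.product over a list of lists (last factor fastest)
def pvProd : List (List String) → List (List String)
  | [] => [[]]
  | l :: ls => l.flatMap (fun x => (pvProd ls).map (fun rest => x :: rest))

def get_cartesian (keys : List String) (attributes : List (String × List String)) : List (List String) :=
  let list_of_attributes := keys.foldl (fun acc key => acc ++ [pvLookup attributes key]) []
  (pvProd list_of_attributes).foldl (fun acc element => acc ++ [element]) []

-- ===== PORT B =====
def get_cartesian_alt (keys : List String) (attributes : List (String × List String)) : List (List String) :=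
  keys.foldl (fun result key =>
    result.flatMap (fun prev => (pvLookup attributes key).map (fun x => prev ++ [x]))) [[]]

-- ===== PRECONDITION & SPEC =====
-- Pre_ excludes exactly the inputs where some selected key is absent: there Python A raises KeyError.
def Pre_get_cartesian (keys : List String) (attributes : List (String × List String)) : Prop :=
  ∀ k ∈ keys, k ∈ attributes.map Prod.fst

instance (keys : List String) (attributes : List (String × List String)) : Decidable (Pre_get_cartesian keys attributes) := by unfold Pre_get_cartesian; infer_instance

def pvWitness_get_cartesian : List String × (List (String × List String)) :=
  (["a", "b"], [("a", ["x", "y"]), ("b", ["u"])])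

def Spec_get_cartesian (keys : List String) (attributes : List (String × List String)) (out : List (List String)) : Prop := out = get_cartesian_alt keys attributes
instance (keys : List String) (attributes : List (String × List String)) (out : List (List String)) : Decidable (Spec_get_cartesian keys attributes out) := by unfold Spec_get_cartesian; infer_instance

-- ===== CLAIM (what is proved, stated in full; the proofs are below) =====
def Claim_equal_get_cartesian : Prop := ∀ (keys : List String) (attributes : List (String × List String)), Dom_get_cartesian keys attributes → Pre_get_cartesian keys attributes → Spec_get_cartesian keys attributes (get_cartesian keys attributes)

-- ===== LEMMAS AND PROOFS =====

theorem pv_foldl_app {α β : Type} (f : α → β) (xs : List α) (init : List β) :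
    xs.foldl (fun acc x => acc ++ [f x]) init = init ++ xs.map f := by
  induction xs generalizing init with
  | nil => simp
  | cons x xs ih => simp [List.foldl, ih]

theorem pv_foldl_id (xs : List (List String)) (init : List (List String)) :
    xs.foldl (fun acc x => acc ++ [x]) init = init ++ xs := by
  induction xs generalizing init with
  | nil => simp
  | cons x xs ih => simp [List.foldl, ih]

theorem pv_expand (lss : List (List String)) (acc : List (List String)) :
    lss.foldl (fun r l => r.flatMap (fun prev => l.map (fun x => prev ++ [x]))) acc
      = acc.flatMap (fun p => (pvProd lss).map (fun t => p ++ t)) := by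
  induction lss generalizing acc with
  | nil => simp [pvProd]
  | cons l ls ih =>
    simp only [List.foldl, ih, pvProd]
    simp [List.flatMap_assoc, List.map_flatMap, List.flatMap_map, Function.comp_def]

theorem get_cartesian_eq (keys : List String) (attributes : List (String × List String)) :
    get_cartesian keys attributes = get_cartesian_alt keys attributes := by
  unfold get_cartesian get_cartesian_alt
  rw [pv_foldl_app (pvLookup attributes) keys [], pv_foldl_id, List.nil_append, List.nil_append]
  have h := pv_expand (keys.map (pvLookup attributes)) [[]]
  rw [List.foldl_map] at h
  rw [h]
  simp

-- ===== VERDICT (by name: the statement is the Claim_ definition above) =====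
theorem get_cartesian_spec : Claim_equal_get_cartesian := by
  intro keys attributes _ _
  unfold Spec_get_cartesian
  exact get_cartesian_eq keys attributes
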